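-- pv_equiv track=rewrite | github.com/Moo-YewTsing/paper_prepare | get_paper.py | title_px
-- ===== SOURCE A (Python) =====
-- def title_px(start=18, end=39):
--     assert start < end, """end is larger than start\
--  and match only one title font size is meaningless"""
--     s_str = str(start)
--     e_str = str(end)
--     assert len(s_str) == 2 and len(e_str) == 2, "title's font-size is double-digit"
--     heads = list(range(int(s_str[0]), int(e_str[0])+1))
--     ends = []
--     num_heads = len(heads)
--     if num_heads > 1:
--         for idx in range(num_heads):
--             if idx == 0:
--                 if s_str[1] == "9":
--                     ends.append("9")
--                 else:
--                     ends.append("[{}-9]".format(s_str[1]))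
--             elif idx == num_heads - 1:
--                 if e_str[1] == "0":
--                     ends.append("0")
--                 else:
--                     ends.append("[0-{}]".format(e_str[1]))
--             else:
--                 ends.append("[0-9]")
--     else:
--         ends.append("[{}-{}]".format(s_str[1], e_str[1]))
--     return '|'.join((str(head)+end for head, end in zip(heads, ends)))
-- ===== SOURCE B (Python) =====
-- def title_px(start=18, end=39):
--     assert start < end, """end is larger than start\
--  and match only one title font size is meaningless"""
--     s_str = str(start)
--     e_str = str(end)
--     assert len(s_str) == 2 and len(e_str) == 2, "title's font-size is double-digit"
--     # Enumerate every matching size and group their unit digits by tens digit,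
--     # then compress each group into one alternative.
--     groups = {}
--     for n in range(start, end + 1):
--         groups[n // 10] = groups.get(n // 10, []) + [n % 10]
--     parts = []
--     for head, units in groups.items():
--         lo, hi = units[0], units[-1]
--         parts.append(str(head) + (str(hi) if lo == hi else "[{}-{}]".format(lo, hi)))
--     return "|".join(parts)
-- ===== Notes on version B (the rewrite author's own statement) =====
-- stated objective: alternative
-- what changed: B enumerates every size in range(start, end+1), groups the unit digits by tens digit in a dict built in one pass, and then compresses each group into one alternative from its first/last unit, replacing A's decade-index loop with idx==0/last/middle special cases and its separate single-head branch.
import Mathlib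
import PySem

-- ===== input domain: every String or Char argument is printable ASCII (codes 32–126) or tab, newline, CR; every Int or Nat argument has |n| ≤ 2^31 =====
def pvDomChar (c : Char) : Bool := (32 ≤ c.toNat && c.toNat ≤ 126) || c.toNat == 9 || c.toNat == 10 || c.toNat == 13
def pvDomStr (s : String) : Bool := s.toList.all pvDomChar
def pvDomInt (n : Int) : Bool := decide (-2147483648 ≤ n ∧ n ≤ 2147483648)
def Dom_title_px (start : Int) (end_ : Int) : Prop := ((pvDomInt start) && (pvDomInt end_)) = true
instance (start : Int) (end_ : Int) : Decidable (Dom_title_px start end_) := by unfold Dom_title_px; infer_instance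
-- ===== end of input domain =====

-- B enumerates every size in range(start, end+1), groups the unit digits by tens digit in a
-- dict, then compresses each group into one alternative — replacing A's decade-index loop
-- with its idx==0/last/middle special cases. Equivalence of the return value is proved on
-- Pre_ (exactly where A returns: both asserts pass and int(str(n)[0]) parses, i.e. 10 ≤ start < end_ ≤ 99).

-- ===== PORT A =====
def title_px (start : Int) (end_ : Int) : String :=
  -- assert start < end_ ; assert len(str(start)) == 2 == len(str(end_))  (raise ⇒ outside Pre_)
  let s_str := PySem.Int.toChars start
  let e_str := PySem.Int.toChars end_
  -- int(s_str[0]) / int(e_str[0]); ValueError (e.g. '-') is outside Pre_, hence the getD defaults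
  let heads := PySem.List.pyRange ((PySem.Int.ofChars? [PySem.List.pyGetD s_str 0 ' ']).getD 0)
                 ((PySem.Int.ofChars? [PySem.List.pyGetD e_str 0 ' ']).getD 0 + 1) 1
  let num_heads : Int := PySem.List.len heads
  let ends : List (List Char) :=
    if num_heads > 1 then
      (PySem.List.pyRange 0 num_heads 1).foldl (fun acc idx =>
        if idx = 0 then
          if PySem.List.pyGetD s_str 1 ' ' = '9' then acc ++ [['9']]
          else acc ++ ['[' :: PySem.List.pyGetD s_str 1 ' ' :: ['-', '9', ']']]
        else if idx = num_heads - 1 then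
          if PySem.List.pyGetD e_str 1 ' ' = '0' then acc ++ [['0']]
          else acc ++ [['[', '0', '-'] ++ [PySem.List.pyGetD e_str 1 ' ', ']']]
        else acc ++ [['[', '0', '-', '9', ']']]) []
    else [['['] ++ [PySem.List.pyGetD s_str 1 ' ', '-', PySem.List.pyGetD e_str 1 ' ', ']']]
  String.ofList (PySem.Chars.join ['|'] ((heads.zip ends).map (fun he => PySem.Int.toChars he.1 ++ he.2)))

-- ===== PORT B =====
def title_px_alt (start : Int) (end_ : Int) : String :=
  -- both asserts raise ⇒ outside Pre_
  let groups := (PySem.List.pyRange start (end_ + 1) 1).foldl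
    (fun d n => d.modify (PySem.Int.floordiv n 10) []
      (fun us => us ++ [PySem.Int.mod n 10])) (PySem.Dict.empty)
  let parts := groups.items.foldl (fun acc p =>
    -- units[0] / units[-1]; groups' value lists are never empty, hence the getD defaults
    let lo := (PySem.List.pyGet? p.2 0).getD 0
    let hi := (PySem.List.pyGet? p.2 (-1)).getD 0
    acc ++ [PySem.Int.toChars p.1 ++
      (if lo = hi then PySem.Int.toChars hi
       else '[' :: PySem.Int.toChars lo ++ '-' :: PySem.Int.toChars hi ++ [']'])]) []
  String.ofList (PySem.Chars.join ['|'] parts)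

-- ===== PRECONDITION & SPEC =====
-- Pre_: exactly the inputs where A returns: start < end_ (first assert), both str()s of
-- length 2 with a digit first character (second assert passes and int(s[0]) parses; str(n)
-- has length 2 with digit head iff 10 ≤ n ≤ 99).
def Pre_title_px (start : Int) (end_ : Int) : Prop :=
  10 ≤ start ∧ start < end_ ∧ end_ ≤ 99
instance (start : Int) (end_ : Int) : Decidable (Pre_title_px start end_) := by
  unfold Pre_title_px; infer_instance
def pvWitness_title_px : Int × Int := (18, 39)
def Spec_title_px (start : Int) (end_ : Int) (out : String) : Prop := out = title_px_alt start end_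
instance (start : Int) (end_ : Int) (out : String) : Decidable (Spec_title_px start end_ out) := by
  unfold Spec_title_px; infer_instance

-- ===== CLAIM =====
def Claim_equal_title_px : Prop := ∀ (start : Int) (end_ : Int), Dom_title_px start end_ → Pre_title_px start end_ → Spec_title_px start end_ (title_px start end_)

-- ===== LEMMAS AND PROOFS =====

-- the common per-decade rendering both programs produce, parameterised by the four digits
def goldPart (t u v w : Int) (c : Int) : List Char :=
  if (if c = t then u else 0) = (if c = v then w else 9) then
    PySem.Int.toChars c ++ PySem.Int.toChars (if c = v then w else 9)
  else
    PySem.Int.toChars c ++ '[' :: PySem.Int.toChars (if c = t then u else 0) ++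
      '-' :: PySem.Int.toChars (if c = v then w else 9) ++ [']']

def gold (t u v w : Int) : List Char :=
  PySem.Chars.join ['|'] ((PySem.List.pyRange t (v + 1) 1).map (goldPart t u v w))

-- str(n) for a two-digit n, as its two digit characters
theorem toChars_two_digit : ∀ m : Nat, m < 100 → 10 ≤ m →
    PySem.Int.toChars (m : Int) = [Char.ofNat (48 + m / 10), Char.ofNat (48 + m % 10)] := by
  decide

-- str(u) for a single digit
theorem toChars_digit : ∀ u : Nat, u < 10 → PySem.Int.toChars (u : Int) = [Char.ofNat (48 + u)] := by
  decide

-- int(c) for a digit character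
theorem ofChars_digit : ∀ t : Nat, t < 10 →
    PySem.Int.ofChars? [Char.ofNat (48 + t)] = some (t : Int) := by
  decide

theorem digit_eq_nine : ∀ u : Nat, u < 10 → ((Char.ofNat (48 + u) = '9') ↔ u = 9) := by decide
theorem digit_eq_zero : ∀ u : Nat, u < 10 → ((Char.ofNat (48 + u) = '0') ↔ u = 0) := by decide

-- ---- B-side characterisation ----


theorem map_mod_lemma : ∀ (c lo hi : Int), 0 ≤ lo → hi ≤ 10 →
    (PySem.List.pyRange (10 * c + lo) (10 * c + hi) 1).map (fun n => PySem.Int.mod n 10)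
      = PySem.List.pyRange lo hi 1 := by
  intro c lo hi h0 h10
  rw [PySem.List.pyRange_one, PySem.List.pyRange_one, List.map_map]
  rw [show 10 * c + hi - (10 * c + lo) = hi - lo from by ring]
  apply List.map_congr_left
  intro k hk
  rw [List.mem_range] at hk
  simp only [Function.comp_apply]
  rw [PySem.Int.mod_eq_emod_of_pos (by norm_num)]
  omega

theorem keys_lemma : ∀ (N : Nat) (a : Int),
    PySem.Set.ofList ((PySem.List.pyRange a (a + (N : Int) + 1) 1).map (fun n => PySem.Int.floordiv n 10))
      = PySem.List.pyRange (PySem.Int.floordiv a 10) (PySem.Int.floordiv (a + (N : Int)) 10 + 1) 1 := by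
  intro N
  induction N with
  | zero =>
    intro a
    simp only [Nat.cast_zero, add_zero]
    rw [PySem.List.pyRange_one_singleton, List.map_singleton]
    rw [PySem.Set.ofList_cons, PySem.Set.ofList_nil, PySem.List.pyRange_one_singleton]
    rfl
  | succ n ih =>
    intro a
    have hd : ∀ x : Int, PySem.Int.floordiv x 10 = x / 10 :=
      fun x => PySem.Int.floordiv_eq_ediv_of_pos (by norm_num)
    rw [show a + ((n + 1 : Nat) : Int) = a + (n : Nat) + 1 from by push_cast; ring]
    rw [PySem.List.pyRange_one_succ_right (by omega), List.map_append, List.map_singleton,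
      PySem.Set.ofList_append_singleton, ih a]
    simp only [hd]
    by_cases h : (a + (n : Nat) + 1) / 10 = (a + (n : Nat)) / 10
    · rw [PySem.Set.add_of_mem (by rw [PySem.List.mem_pyRange_one]; omega), h]
    · have h2 : (a + (n : Nat) + 1) / 10 = (a + (n : Nat)) / 10 + 1 := by omega
      rw [PySem.Set.add_of_not_mem (by rw [PySem.List.mem_pyRange_one]; omega), h2,
        ← PySem.List.pyRange_one_succ_right (by omega)]

theorem filt_lemma : ∀ (N : Nat) (x c : Int),
    (PySem.List.pyRange x (x + (N : Int)) 1).filter (fun n => PySem.Int.floordiv n 10 == c)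
      = PySem.List.pyRange (max x (10 * c)) (min (x + (N : Int)) (10 * c + 10)) 1 := by
  intro N
  induction N with
  | zero =>
    intro x c
    simp only [Nat.cast_zero, add_zero]
    rw [PySem.List.pyRange_one_eq_nil (le_refl x), List.filter_nil,
      PySem.List.pyRange_one_eq_nil (by omega)]
  | succ n ih =>
    intro x c
    rw [PySem.List.pyRange_one_cons (by push_cast; omega), List.filter_cons]
    have hx1 : x + ((n + 1 : Nat) : Int) = (x + 1) + (n : Nat) := by push_cast; ring
    by_cases h : x / 10 = c
    · rw [if_pos (by simp [h]), hx1, ih (x + 1) c]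
      rw [show max (x + 1) (10 * c) = x + 1 from by omega,
        show max x (10 * c) = x from by omega]
      rw [← PySem.List.pyRange_one_cons (by omega)]
    · rw [if_neg (by simp [h]), hx1, ih (x + 1) c]
      by_cases hlt : x < 10 * c
      · rw [show max (x + 1) (10 * c) = 10 * c from by omega,
          show max x (10 * c) = 10 * c from by omega]
      · rw [PySem.List.pyRange_one_eq_nil (by omega), PySem.List.pyRange_one_eq_nil (by omega)]

theorem altB_eq_gold : ∀ t u v w : Int, 1 ≤ t → t ≤ v → v ≤ 9 → 0 ≤ u → u ≤ 9 → 0 ≤ w → w ≤ 9 →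
    10 * t + u < 10 * v + w →
    title_px_alt (10 * t + u) (10 * v + w) = String.ofList (gold t u v w) := by
  simp only [gold]
  intro t u v w ht htv hv hu0 hu hw0 hw hab
  have hd : ∀ y : Int, PySem.Int.floordiv y 10 = y / 10 :=
    fun y => PySem.Int.floordiv_eq_ediv_of_pos (by norm_num)
  simp only [title_px_alt]
  -- the grouping dict
  set a : Int := 10 * t + u with ha
  set b : Int := 10 * v + w with hb
  set step : PySem.Dict Int (List Int) → Int → PySem.Dict Int (List Int) :=
    fun d n => d.modify (PySem.Int.floordiv n 10) [] (fun us => us ++ [PySem.Int.mod n 10]) with hstep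
  set groups := (PySem.List.pyRange a (b + 1) 1).foldl step PySem.Dict.empty with hgroups
  -- keys
  have hkeys : groups.keys = PySem.List.pyRange t (v + 1) 1 := by
    rw [hgroups, hstep]
    rw [PySem.Dict.keys_foldl_modify_key _ (fun n => PySem.Int.floordiv n 10) []
      (fun _ n us => us ++ [PySem.Int.mod n 10])]
    rw [PySem.Dict.keys_empty, PySem.Set.update_nil_left]
    have hN : b = a + ((b - a).toNat : Int) := by omega
    rw [show b + 1 = a + ((b - a).toNat : Int) + 1 from by omega]
    rw [keys_lemma]
    rw [hd, hd, ← hN]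
    rw [show a / 10 = t from by omega, show b / 10 = v from by omega]
  have hnodup : groups.keys.Nodup := by
    rw [hgroups, hstep]
    exact PySem.Dict.nodup_keys_foldl_modify_key _ (fun n => PySem.Int.floordiv n 10) []
      (fun _ n us => us ++ [PySem.Int.mod n 10]) PySem.Dict.empty (by simp)
  -- per-key unit lists
  have hgetD : ∀ c : Int, t ≤ c → c ≤ v →
      groups.getD c [] = PySem.List.pyRange (if c = t then u else 0)
        ((if c = v then w else 9) + 1) 1 := by
    intro c hc1 hc2
    rw [hgroups, hstep, ← List.foldl_map (f := fun n => (PySem.Int.floordiv n 10, PySem.Int.mod n 10))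
      (g := fun (d : PySem.Dict Int (List Int)) (p : Int × Int) => d.modify p.1 [] (fun us => us ++ [p.2]))]
    rw [PySem.Dict.getD_foldl_modify_append, PySem.Dict.getD_empty]
    rw [List.filter_map, List.map_map]
    simp only [Function.comp_def]
    rw [show b + 1 = a + (((b + 1) - a).toNat : Int) from by omega, filt_lemma,
      ← show b + 1 = a + (((b + 1) - a).toNat : Int) from by omega]
    by_cases hct : c = t <;> by_cases hcv : c = v
    · rw [show max a (10 * c) = 10 * c + u from by omega,
        show min (b + 1) (10 * c + 10) = 10 * c + (w + 1) from by omega,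
        map_mod_lemma c u (w + 1) hu0 (by omega), if_pos hct, if_pos hcv]
      simp
    · rw [show max a (10 * c) = 10 * c + u from by omega,
        show min (b + 1) (10 * c + 10) = 10 * c + 10 from by omega,
        map_mod_lemma c u 10 hu0 (by omega), if_pos hct, if_neg hcv]
      norm_num
    · rw [show max a (10 * c) = 10 * c + 0 from by omega,
        show min (b + 1) (10 * c + 10) = 10 * c + (w + 1) from by omega,
        map_mod_lemma c 0 (w + 1) (by omega) (by omega), if_neg hct, if_pos hcv]
      simp
    · rw [show max a (10 * c) = 10 * c + 0 from by omega,
        show min (b + 1) (10 * c + 10) = 10 * c + 10 from by omega,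
        map_mod_lemma c 0 10 (by omega) (by omega), if_neg hct, if_neg hcv]
      norm_num
  -- items, then the parts loop as a map
  rw [PySem.Dict.items_eq_map_keys groups hnodup []]
  rw [PySem.List.foldl_append_singleton_eq_map, List.nil_append, List.map_map, hkeys]
  refine congrArg _ (congrArg _ (List.map_congr_left ?_))
  intro c hc
  rw [PySem.List.mem_pyRange_one] at hc
  simp only [Function.comp_apply]
  rw [hgetD c hc.1 (by omega)]
  set lo : Int := if c = t then u else 0 with hlo
  set hi : Int := if c = v then w else 9 with hhi
  have hlo0 : 0 ≤ lo := by rw [hlo]; split_ifs <;> omega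
  have hlohi : lo ≤ hi := by
    rw [hlo, hhi]; split_ifs <;> omega
  have hfirst : (PySem.List.pyGet? (PySem.List.pyRange lo (hi + 1) 1) 0).getD 0 = lo := by
    rw [PySem.List.pyRange_one_cons (by omega), PySem.List.pyGet?_zero_cons, Option.getD_some]
  have hlast : (PySem.List.pyGet? (PySem.List.pyRange lo (hi + 1) 1) (-1)).getD 0 = hi := by
    rw [PySem.List.pyRange_one_succ_right (by omega),
      PySem.List.pyGet?_neg_one_append_singleton, Option.getD_some]
  rw [hfirst, hlast, goldPart, ← hlo, ← hhi]
  split_ifs <;> simp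


theorem A_eq_gold : ∀ t u v w : Nat, 1 ≤ t → t ≤ v → v ≤ 9 → u ≤ 9 → w ≤ 9 →
    10 * t + u < 10 * v + w →
    title_px ((10 * t + u : Nat) : Int) ((10 * v + w : Nat) : Int)
      = String.ofList (gold (t : Int) (u : Int) (v : Int) (w : Int)) := by
  intro t u v w ht1 htv hv9 hu9 hw9 hab
  have hSA : PySem.Int.toChars ((10 * t + u : Nat) : Int)
      = [Char.ofNat (48 + t), Char.ofNat (48 + u)] := by
    have h := toChars_two_digit (10 * t + u) (by omega) (by omega)
    rwa [show (10 * t + u) / 10 = t from by omega, show (10 * t + u) % 10 = u from by omega] at h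
  have hSE : PySem.Int.toChars ((10 * v + w : Nat) : Int)
      = [Char.ofNat (48 + v), Char.ofNat (48 + w)] := by
    have h := toChars_two_digit (10 * v + w) (by omega) (by omega)
    rwa [show (10 * v + w) / 10 = v from by omega, show (10 * v + w) % 10 = w from by omega] at h
  simp only [title_px, gold, hSA, hSE,
    PySem.List.pyGetD_ofNat', List.getD_cons_succ,
    List.getD_cons_zero, ofChars_digit t (by omega), ofChars_digit v (by omega),
    Option.getD_some, PySem.List.len_eq, PySem.List.length_pyRange_one]
  -- n = v - t: number of extra heads
  obtain ⟨n, rfl⟩ : ∃ n, v = t + n := ⟨v - t, by omega⟩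
  have hlen : (((t + n : Nat) : Int) + 1 - ↑t).toNat = n + 1 := by omega
  rw [hlen]
  rcases n with _ | n
  · -- single head: t = v
    rw [if_neg (show ¬(((0 + 1 : Nat) : Int) > 1) from by omega)]
    have hsing : PySem.List.pyRange (↑t) (((t + 0 : Nat) : Int) + 1) = [(↑t : Int)] := by
      rw [show (((t + 0 : Nat) : Int) + 1) = (↑t : Int) + 1 from by omega]
      exact PySem.List.pyRange_one_singleton _
    rw [hsing]
    simp only [Nat.add_zero]
    have huw : ¬((↑u : Int) = ↑w) := by omega
    simp [goldPart, huw, toChars_digit u (by omega), toChars_digit w (by omega)]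
  · -- at least two heads
    rw [if_pos (show ((n + 1 + 1 : Nat) : Int) > 1 from by omega)]
    rw [PySem.List.foldl_congr_mem _ _
      (fun acc idx => acc ++ [if idx = 0 then
          (if Char.ofNat (48 + u) = '9' then ['9'] else ['[', Char.ofNat (48 + u), '-', '9', ']'])
        else if idx = ((n + 1 + 1 : Nat) : Int) - 1 then
          (if Char.ofNat (48 + w) = '0' then ['0'] else ['[', '0', '-'] ++ [Char.ofNat (48 + w), ']'])
        else ['[', '0', '-', '9', ']']]) _
      (by intro acc x _; dsimp only; split_ifs <;> rfl),
      PySem.List.foldl_append_singleton_eq_map]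
    have hr1 : PySem.List.pyRange (↑t) (((t + (n + 1) : Nat) : Int) + 1)
        = List.map (fun j => ((↑t : Int) + ↑j)) (List.range (n + 2)) := by
      rw [PySem.List.pyRange_one,
        show ((((t + (n + 1) : Nat) : Int)) + 1 - (t : Int)).toNat = n + 2 from by omega]
    have hr2 : PySem.List.pyRange 0 ((n + 1 + 1 : Nat) : Int)
        = List.map (fun j => ((↑j : Nat) : Int)) (List.range (n + 2)) := by
      rw [PySem.List.pyRange_one]
      rw [show (((n + 1 + 1 : Nat) : Int) - 0).toNat = n + 2 from by omega]
      simp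
    rw [hr1, hr2]
    simp only [List.nil_append, List.map_map]
    rw [List.zip_map', List.map_map]
    refine congrArg _ (congrArg _ ?_)
    apply List.map_congr_left
    intro j hj
    rw [List.mem_range] at hj
    simp only [Function.comp_apply, goldPart]
    by_cases hj0 : j = 0
    · subst hj0
      rw [if_pos (show ((0 : Nat) : Int) = 0 from by omega),
        if_pos (show (↑t : Int) + ((0 : Nat) : Int) = ↑t from by omega),
        if_neg (show ¬((↑t : Int) + ((0 : Nat) : Int) = ↑(t + (n + 1))) from by omega)]
      by_cases hu : u = 9
      · subst hu
        rw [if_pos (show Char.ofNat (48 + 9) = '9' from by decide),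
          if_pos (show ((9 : Nat) : Int) = 9 from by omega)]
        simp [show PySem.Int.toChars 9 = ['9'] from rfl]
      · rw [if_neg (fun h => hu ((digit_eq_nine u (by omega)).mp h)),
          if_neg (show ¬((↑u : Int) = 9) from by omega)]
        simp [toChars_digit u (by omega), show PySem.Int.toChars 9 = ['9'] from rfl]
    · by_cases hjn : j = n + 1
      · subst hjn
        rw [if_neg (show ¬(((n + 1 : Nat) : Int) = 0) from by omega),
          if_pos (show ((n + 1 : Nat) : Int) = ((n + 1 + 1 : Nat) : Int) - 1 from by omega),
          if_neg (show ¬((↑t : Int) + ((n + 1 : Nat) : Int) = ↑t) from by omega),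
          if_pos (show (↑t : Int) + ((n + 1 : Nat) : Int) = ↑(t + (n + 1)) from by omega)]
        by_cases hw : w = 0
        · subst hw
          rw [if_pos (show Char.ofNat (48 + 0) = '0' from by decide),
            if_pos (show (0 : Int) = ((0 : Nat) : Int) from by omega)]
          simp [show PySem.Int.toChars 0 = ['0'] from rfl]
        · rw [if_neg (fun h => hw ((digit_eq_zero w (by omega)).mp h)),
            if_neg (show ¬((0 : Int) = ((w : Nat) : Int)) from by omega)]
          simp [toChars_digit w (by omega), show PySem.Int.toChars 0 = ['0'] from rfl]
      · rw [if_neg (show ¬(((j : Nat) : Int) = 0) from by omega),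
          if_neg (show ¬(((j : Nat) : Int) = ((n + 1 + 1 : Nat) : Int) - 1) from by omega),
          if_neg (show ¬((↑t : Int) + ((j : Nat) : Int) = ↑t) from by omega),
          if_neg (show ¬((↑t : Int) + ((j : Nat) : Int) = ↑(t + (n + 1))) from by omega),
          if_neg (show ¬((0 : Int) = 9) from by omega)]
        simp [show PySem.Int.toChars 0 = ['0'] from rfl, show PySem.Int.toChars 9 = ['9'] from rfl]

-- ===== VERDICT =====
theorem title_px_spec : Claim_equal_title_px := by
  intro start end_ _hdom hpre
  obtain ⟨h1, h2, h3⟩ := hpre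
  show title_px start end_ = title_px_alt start end_
  obtain ⟨t, u, ht, htv, hu, rfl⟩ : ∃ t u : Nat, 1 ≤ t ∧ t ≤ 9 ∧ u ≤ 9 ∧ start = ((10 * t + u : Nat) : Int) :=
    ⟨start.toNat / 10, start.toNat % 10, by omega, by omega, by omega, by omega⟩
  obtain ⟨v, w, hv, hvv, hw, rfl⟩ : ∃ v w : Nat, 1 ≤ v ∧ v ≤ 9 ∧ w ≤ 9 ∧ end_ = ((10 * v + w : Nat) : Int) :=
    ⟨end_.toNat / 10, end_.toNat % 10, by omega, by omega, by omega, by omega⟩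
  have hlt : 10 * t + u < 10 * v + w := by omega
  rw [A_eq_gold t u v w ht (by omega) (by omega) hu hw hlt]
  have hB := altB_eq_gold (t : Int) (u : Int) (v : Int) (w : Int)
    (by omega) (by omega) (by omega) (by omega) (by omega) (by omega) (by omega) (by omega)
  rw [show ((10 * t + u : Nat) : Int) = 10 * (t : Int) + (u : Int) from by push_cast; ring,
      show ((10 * v + w : Nat) : Int) = 10 * (v : Int) + (w : Int) from by push_cast; ring, hB]
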